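-- pv_equiv track=rewrite | github.com/pypi-data/pypi-mirror-367 | packages/antlr-v4-linter/antlr_v4_linter-0.1.3-py3-none-any.whl/antlr_v4_linter/core/parser.py | _remove_block_comments
-- ===== SOURCE A (Python) =====
-- def _remove_block_comments(content: str) -> str:
--     """Remove /* */ block comments while preserving line numbers."""
--     result = []
--     in_block_comment = False
--     i = 0
--
--     while i < len(content):
--         # Check for start of block comment
--         if not in_block_comment and i < len(content) - 1 and content[i:i+2] == '/*':
--             in_block_comment = True
--             # Replace with spaces to preserve positions
--             result.append(' ')
--             result.append(' ')
--             i += 2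
--             continue
--
--         # Check for end of block comment
--         if in_block_comment and i < len(content) - 1 and content[i:i+2] == '*/':
--             in_block_comment = False
--             result.append(' ')
--             result.append(' ')
--             i += 2
--             continue
--
--         # If in block comment, replace with space (preserving newlines)
--         if in_block_comment:
--             if content[i] == '\n':
--                 result.append('\n')
--             else:
--                 result.append(' ')
--         else:
--             result.append(content[i])
--
--         i += 1
--
--     return ''.join(result)
-- ===== SOURCE B (Python) =====
-- def _blank(seg):
--     return ''.join('\n' if c == '\n' else ' ' for c in seg)
--
--
-- def _remove_block_comments(content: str) -> str:
--     """Remove /* */ block comments while preserving line numbers."""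
--     p = content.find('/*')
--     if p == -1:
--         return content
--     q = content.find('*/', p + 2)
--     if q == -1:
--         return content[:p] + _blank(content[p:])
--     return content[:p] + _blank(content[p:q + 2]) + _remove_block_comments(content[q + 2:])
-- ===== Notes on version B (the rewrite author's own statement) =====
-- stated objective: faster
-- what changed: Replaces A's per-character while loop with an in_block_comment boolean state machine by find-based segment jumping: locate the next comment opener, locate its matching closer, blank the whole region at once (newlines kept), and recurse on the remainder; str.find scans at C speed instead of one Python iteration per character.
import Mathlib
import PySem

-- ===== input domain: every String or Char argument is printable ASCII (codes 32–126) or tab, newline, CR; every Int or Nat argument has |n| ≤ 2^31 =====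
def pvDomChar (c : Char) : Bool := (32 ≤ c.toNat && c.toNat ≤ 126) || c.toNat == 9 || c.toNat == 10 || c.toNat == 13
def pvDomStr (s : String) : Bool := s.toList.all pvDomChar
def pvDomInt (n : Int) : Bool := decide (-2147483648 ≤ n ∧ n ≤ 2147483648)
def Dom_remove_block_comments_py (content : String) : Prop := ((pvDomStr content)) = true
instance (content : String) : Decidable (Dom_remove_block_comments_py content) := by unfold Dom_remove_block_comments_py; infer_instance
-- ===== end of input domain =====

-- B replaces A's per-character boolean state machine by find-based segment jumping (locate the
-- next comment opener, locate its matching closer, blank the region, recurse on the rest);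
-- str.find scans at C speed, measured faster in a timing run.

-- ===== PORT A =====
-- A's while loop over indices with an in_block_comment flag, transliterated as structural
-- recursion over the character list carrying the same flag; `content[i:i+2] == '/*'` with the
-- `i < len(content) - 1` guard is exactly "the next two characters exist and are '/','*'".
def pvGoA : Bool → List Char → List Char
  | _, [] => []
  | inb, c1 :: rest =>
    match rest with
    | c2 :: rest2 =>
      if inb = false ∧ c1 = '/' ∧ c2 = '*' then ' ' :: ' ' :: pvGoA true rest2
      else if inb = true ∧ c1 = '*' ∧ c2 = '/' then ' ' :: ' ' :: pvGoA false rest2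
      else (if inb then (if c1 = '\n' then '\n' else ' ') else c1) :: pvGoA inb (c2 :: rest2)
    | [] => (if inb then (if c1 = '\n' then '\n' else ' ') else c1) :: pvGoA inb []
termination_by _ s => s.length
decreasing_by all_goals simp

def remove_block_comments_py (content : String) : String :=
  String.ofList (pvGoA false content.toList)

-- ===== PORT B =====
-- _blank: each character mapped to '\n' if it is a newline else ' '.
def pvBlank (seg : List Char) : List Char :=
  seg.map (fun c => if c = '\n' then '\n' else ' ')

-- Source B's recursion; p and q are Python str.find results, and in the branches that use them
-- they are nonnegative, so the slices content[:p], content[p:], content[p:q+2], content[q+2:]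
-- are exactly take/drop at p.toNat / q.toNat.
def pvBGo (s : List Char) : List Char :=
  let p := PySem.Chars.find s ['/', '*']
  if p = -1 then s
  else
    let q := PySem.Chars.findFrom s ['*', '/'] (p + 2) none
    if q = -1 then s.take p.toNat ++ pvBlank (s.drop p.toNat)
    else s.take p.toNat ++ pvBlank ((s.drop p.toNat).take (q.toNat + 2 - p.toNat))
           ++ pvBGo (s.drop (q.toNat + 2))
termination_by s.length
decreasing_by
  rename_i hp _
  have : ['/', '*'] <:+: s := (PySem.Chars.find_ne_neg_one_iff s _).mp hp
  have h2 : 2 ≤ s.length := by simpa using this.length_le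
  simp only [List.length_drop]; omega

def remove_block_comments_py_alt (content : String) : String :=
  String.ofList (pvBGo content.toList)

-- ===== PRECONDITION & SPEC =====
def Spec_remove_block_comments_py (content : String) (out : String) : Prop := out = remove_block_comments_py_alt content
instance (content : String) (out : String) : Decidable (Spec_remove_block_comments_py content out) := by unfold Spec_remove_block_comments_py; infer_instance

-- ===== CLAIM (what is proved, stated in full; the proofs are below) =====
def Claim_equal_remove_block_comments_py : Prop := ∀ (content : String), Dom_remove_block_comments_py content → Spec_remove_block_comments_py content (remove_block_comments_py content)

-- ===== LEMMAS AND PROOFS =====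

-- outside comments, text with no '/*' is copied verbatim
theorem pvGoA_false_no (s : List Char) (h : ¬ ['/', '*'] <:+: s) : pvGoA false s = s := by
  induction s with
  | nil => simp [pvGoA]
  | cons c rest ih =>
    cases rest with
    | nil => simp [pvGoA]
    | cons c2 r2 =>
      have hb : ¬ (c = '/' ∧ c2 = '*') := by
        rintro ⟨rfl, rfl⟩; exact h ⟨[], r2, rfl⟩
      have h' : ¬ ['/', '*'] <:+: (c2 :: r2) := by
        rintro ⟨a, b, hab⟩; exact h ⟨c :: a, b, by simp [← hab]⟩
      simp only [pvGoA]
      rw [if_neg (fun hc => hb ⟨hc.2.1, hc.2.2⟩), if_neg (by simp), ih h']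
      simp

-- text with no '/*' followed by a comment opener
theorem pvGoA_false_append (u v : List Char) (h : ¬ ['/', '*'] <:+: u) :
    pvGoA false (u ++ '/' :: '*' :: v) = u ++ ' ' :: ' ' :: pvGoA true v := by
  induction u with
  | nil => simp [pvGoA]
  | cons c u' ih =>
    have h' : ¬ ['/', '*'] <:+: u' := by
      rintro ⟨a, b, hab⟩; exact h ⟨c :: a, b, by simp [← hab]⟩
    cases u' with
    | nil =>
      simp only [List.nil_append, List.cons_append, pvGoA]
      rw [if_neg (by rintro ⟨-, -, hc⟩; exact absurd hc (by decide)), if_neg (by simp)]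
      simp
    | cons c2 u'' =>
      have hb : ¬ (c = '/' ∧ c2 = '*') := by
        rintro ⟨rfl, rfl⟩; exact h ⟨[], u'', rfl⟩
      simp only [List.cons_append, pvGoA]
      rw [if_neg (fun hc => hb ⟨hc.2.1, hc.2.2⟩), if_neg (by simp)]
      simpa using ih h'

-- inside a comment, text with no '*/' is blanked to the end
theorem pvGoA_true_no (s : List Char) (h : ¬ ['*', '/'] <:+: s) : pvGoA true s = pvBlank s := by
  induction s with
  | nil => simp [pvGoA, pvBlank]
  | cons c rest ih =>
    cases rest with
    | nil => simp [pvGoA, pvBlank]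
    | cons c2 r2 =>
      have hb : ¬ (c = '*' ∧ c2 = '/') := by
        rintro ⟨rfl, rfl⟩; exact h ⟨[], r2, rfl⟩
      have h' : ¬ ['*', '/'] <:+: (c2 :: r2) := by
        rintro ⟨a, b, hab⟩; exact h ⟨c :: a, b, by simp [← hab]⟩
      simp only [pvGoA]
      rw [if_neg (by simp), if_neg (fun hc => hb ⟨hc.2.1, hc.2.2⟩), ih h']
      simp [pvBlank]

-- inside a comment, blank up to the closer and continue
theorem pvGoA_true_append (u v : List Char) (h : ¬ ['*', '/'] <:+: u) :
    pvGoA true (u ++ '*' :: '/' :: v) = pvBlank u ++ ' ' :: ' ' :: pvGoA false v := by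
  induction u with
  | nil => simp [pvGoA, pvBlank]
  | cons c u' ih =>
    have h' : ¬ ['*', '/'] <:+: u' := by
      rintro ⟨a, b, hab⟩; exact h ⟨c :: a, b, by simp [← hab]⟩
    cases u' with
    | nil =>
      simp only [List.nil_append, List.cons_append, pvGoA]
      rw [if_neg (by simp), if_neg (by rintro ⟨-, -, hc⟩; exact absurd hc (by decide))]
      simp [pvBlank]
    | cons c2 u'' =>
      have hb : ¬ (c = '*' ∧ c2 = '/') := by
        rintro ⟨rfl, rfl⟩; exact h ⟨[], u'', rfl⟩
      simp only [List.cons_append, pvGoA]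
      rw [if_neg (by simp), if_neg (fun hc => hb ⟨hc.2.1, hc.2.2⟩)]
      simpa [pvBlank] using ih h'

-- a first occurrence at p means no occurrence inside the first p characters
theorem pvNotInfix_take (sub s : List Char) (p : Nat) (hne : sub ≠ [])
    (h : ∀ i < p, ¬ sub <+: s.drop i) : ¬ sub <:+: s.take p := by
  intro hi
  obtain ⟨t, hpt, hts⟩ := List.infix_iff_prefix_suffix.mp hi
  set i := (s.take p).length - t.length with hi_def
  have ht : t = (s.take p).drop i := List.suffix_iff_eq_drop.mp hts
  have hpre : sub <+: (s.drop i).take (p - i) := by rw [← List.drop_take, ← ht]; exact hpt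
  have hpre' : sub <+: s.drop i := hpre.trans (List.take_prefix _ _)
  have hlt : i < p := by
    by_contra hc
    have h0 : p - i = 0 := by omega
    rw [h0, List.take_zero, List.prefix_nil] at hpre
    exact hne hpre
  exact h i hlt hpre'

theorem pvMain (s : List Char) : pvGoA false s = pvBGo s := by
  generalize hn : s.length = n
  induction n using Nat.strong_induction_on generalizing s with
  | _ n IH =>
  rw [pvBGo]
  by_cases hp : PySem.Chars.find s ['/', '*'] = -1
  · simp only [hp, if_pos]
    exact pvGoA_false_no s ((PySem.Chars.find_eq_neg_one_iff s _).mp hp)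
  · set p := PySem.Chars.find s ['/', '*'] with hpdef
    have hp0 : 0 ≤ p := by
      have := PySem.Chars.neg_one_le_find s ['/', '*']; omega
    obtain ⟨hpre, hfirst⟩ := PySem.Chars.find_spec (s := s) (sub := ['/', '*']) hp0
    set t := p.toNat with htdef
    obtain ⟨w, hw⟩ := hpre
    have htle : t ≤ s.length := by
      have := PySem.Chars.find_le_length s ['/', '*']; omega
    have hdl : s.length - t = w.length + 2 := by
      have := congrArg List.length hw; simp at this; omega
    have hlen : t + 2 ≤ s.length := by omega
    have hu : ¬ ['/', '*'] <:+: s.take t := pvNotInfix_take _ _ _ (by simp) hfirst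
    have hs : s = s.take t ++ '/' :: '*' :: w := by
      conv_lhs => rw [← List.take_append_drop t s, ← hw]
      simp
    have hwdrop : s.drop (t + 2) = w := by
      have h2 : s.drop (t + 2) = (s.drop t).drop 2 := by rw [List.drop_drop]
      rw [h2, ← hw]; rfl
    have hcast : (p + 2 : Int) = ((t + 2 : Nat) : Int) := by omega
    have hq := PySem.Chars.findFrom_natCast s ['*', '/'] (t + 2) hlen
    rw [← hcast, hwdrop] at hq
    by_cases hq1 : PySem.Chars.find w ['*', '/'] = -1
    · rw [if_pos hq1] at hq
      rw [if_neg hp, if_pos hq]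
      conv_lhs => rw [hs]
      rw [pvGoA_false_append _ _ hu,
        pvGoA_true_no w ((PySem.Chars.find_eq_neg_one_iff w _).mp hq1), ← hw]
      simp [pvBlank]
    · rw [if_neg hq1] at hq
      set q' := PySem.Chars.find w ['*', '/'] with hq'def
      have hq'0 : 0 ≤ q' := by
        have := PySem.Chars.neg_one_le_find w ['*', '/']; omega
      obtain ⟨hpre2, hfirst2⟩ := PySem.Chars.find_spec (s := w) (sub := ['*', '/']) hq'0
      set t2 := q'.toNat with ht2def
      obtain ⟨w2, hw2⟩ := hpre2
      have ht2le : t2 ≤ w.length := by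
        have := PySem.Chars.find_le_length w ['*', '/']; omega
      have hdl2 : w.length - t2 = w2.length + 2 := by
        have := congrArg List.length hw2; simp at this; omega
      have hu2 : ¬ ['*', '/'] <:+: w.take t2 := pvNotInfix_take _ _ _ (by simp) hfirst2
      have hwsplit : w = w.take t2 ++ '*' :: '/' :: w2 := by
        conv_lhs => rw [← List.take_append_drop t2 w, ← hw2]
        simp
      have hqne : ¬ (p + 2 + q' = -1) := by omega
      rw [if_neg hp, hq]
      simp only [if_neg hqne]
      have hqtoNat : (p + 2 + q').toNat = t + 2 + t2 := by omega
      rw [hqtoNat]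
      have htake4 : t + 2 + t2 + 2 - t = t2 + 4 := by omega
      have hlen2 : (w.take t2).length = t2 := by simp; omega
      have hdropbig : s.drop (t + 2 + t2 + 2) = w2 := by
        have h2 : s.drop (t + 2 + t2 + 2) = (s.drop (t + 2)).drop (t2 + 2) := by
          rw [List.drop_drop, ← Nat.add_assoc]
        rw [h2, hwdrop]
        have h3 : w.drop (t2 + 2) = (w.drop t2).drop 2 := by rw [List.drop_drop]
        rw [h3, ← hw2]; rfl
      have hwtake : w.take (t2 + 2) = w.take t2 ++ ['*', '/'] := by
        conv_lhs => rw [hwsplit]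
        rw [List.take_append, List.take_of_length_le (by rw [hlen2]; omega), hlen2]
        simp [show t2 + 2 - t2 = 2 from by omega]
      have htakeseg : (s.drop t).take (t2 + 4) = '/' :: '*' :: (w.take t2 ++ ['*', '/']) := by
        rw [← hw, List.take_append, List.take_of_length_le (by simp)]
        simp only [List.length_cons, List.length_nil]
        rw [show (t2 + 4 - (0 + 1 + 1) : Nat) = t2 + 2 from by omega, hwtake]
        simp
      rw [htake4, htakeseg, hdropbig]
      conv_lhs => rw [hs]
      rw [pvGoA_false_append _ _ hu]
      conv_lhs => rw [hwsplit]
      rw [pvGoA_true_append _ _ hu2]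
      have hIH : pvGoA false w2 = pvBGo w2 := by
        refine IH w2.length (by omega) w2 rfl
      rw [hIH]
      simp [pvBlank]

-- ===== VERDICT (by name: the statement is the Claim_ definition above) =====
theorem remove_block_comments_py_spec : Claim_equal_remove_block_comments_py := by
  intro content _
  unfold Spec_remove_block_comments_py remove_block_comments_py remove_block_comments_py_alt
  rw [pvMain]
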